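-- pv_equiv track=rewrite | github.com/shogoyoneyama1005/learning_program | llm_sql_openai.py | is_safe_select_sql
-- ===== SOURCE A (Python) =====
-- def is_safe_select_sql(sql: str) -> bool:
--     """
--     Check if SQL query is safe (SELECT-only, no dangerous keywords).
--
--     Args:
--         sql: SQL query string to check
--
--     Returns:
--         True if safe, False otherwise
--     """
--     if not sql.strip():
--         return False
--
--     # Normalize SQL (remove extra whitespace, convert to uppercase)
--     normalized_sql = ' '.join(sql.strip().split()).upper()
--
--     # Must start with SELECT
--     if not normalized_sql.startswith('SELECT'):
--         return False
--
--     # Dangerous keywords that should not appear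
--     dangerous_keywords = [
--         'INSERT', 'UPDATE', 'DELETE', 'DROP', 'ALTER',
--         'CREATE', 'REPLACE', 'TRUNCATE', 'ATTACH',
--         'COPY', 'PRAGMA'
--     ]
--
--     for keyword in dangerous_keywords:
--         if f' {keyword} ' in f' {normalized_sql} ':
--             return False
--
--     return True
-- ===== SOURCE B (Python) =====
-- _DANGEROUS = frozenset({
--     'INSERT', 'UPDATE', 'DELETE', 'DROP', 'ALTER',
--     'CREATE', 'REPLACE', 'TRUNCATE', 'ATTACH',
--     'COPY', 'PRAGMA',
-- })
--
--
-- def is_safe_select_sql(sql: str) -> bool: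
--     """Token-wise safety check: uppercase the query's whitespace-delimited
--     tokens once, require the first to start with SELECT, and reject the
--     query if any token is a dangerous keyword."""
--     tokens = [t.upper() for t in sql.split()]
--     if not tokens:
--         return False
--     if not tokens[0].startswith('SELECT'):
--         return False
--     return all(t not in _DANGEROUS for t in tokens)
-- ===== Notes on version B (the rewrite author's own statement) =====
-- stated objective: idiomatic
-- what changed: Instead of scanning the space-padded normalized string once per dangerous keyword with a substring search, B splits the query into tokens once, uppercases them, and checks each token against a frozenset of dangerous keywords (one pass over the query's own tokens).
import Mathlib
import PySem

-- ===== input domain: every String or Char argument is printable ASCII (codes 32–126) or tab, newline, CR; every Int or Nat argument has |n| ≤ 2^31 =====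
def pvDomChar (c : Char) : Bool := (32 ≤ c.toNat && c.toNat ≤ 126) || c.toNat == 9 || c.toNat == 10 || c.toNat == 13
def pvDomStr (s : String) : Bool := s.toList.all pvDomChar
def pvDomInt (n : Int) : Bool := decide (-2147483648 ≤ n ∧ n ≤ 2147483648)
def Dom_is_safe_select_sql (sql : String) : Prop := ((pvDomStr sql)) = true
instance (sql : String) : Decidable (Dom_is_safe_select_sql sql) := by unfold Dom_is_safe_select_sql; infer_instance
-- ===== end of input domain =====

-- B replaces A's per-keyword substring scan of the normalized query by one pass over the
-- query's own uppercased tokens against a keyword set; same return value on every input.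

-- ===== PORT A =====
def pvDangerousA : List (List Char) :=
  ["INSERT".toList, "UPDATE".toList, "DELETE".toList, "DROP".toList, "ALTER".toList,
   "CREATE".toList, "REPLACE".toList, "TRUNCATE".toList, "ATTACH".toList,
   "COPY".toList, "PRAGMA".toList]

-- the 'for keyword in …: if …: return False' loop is ported as List.any over the same list
def is_safe_select_sql (sql : String) : Bool :=
  let cs := sql.toList
  if PySem.Chars.strip cs = [] then false
  else
    let normalized := PySem.Chars.upper
      (PySem.Chars.join [' '] (PySem.Chars.split₀ (PySem.Chars.strip cs)))
    if !(PySem.Chars.startswith normalized "SELECT".toList) then false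
    else if pvDangerousA.any
        (fun kw => PySem.Chars.isIn ([' '] ++ kw ++ [' ']) ([' '] ++ normalized ++ [' '])) then
      false
    else true

-- ===== PORT B =====
def pvDangerousB : List (List Char) :=
  ["INSERT".toList, "UPDATE".toList, "DELETE".toList, "DROP".toList, "ALTER".toList,
   "CREATE".toList, "REPLACE".toList, "TRUNCATE".toList, "ATTACH".toList,
   "COPY".toList, "PRAGMA".toList]

def pvDangerousSet : PySem.Set (List Char) := PySem.Set.ofList pvDangerousB

def is_safe_select_sql_alt (sql : String) : Bool :=
  let tokens := (PySem.Chars.split₀ sql.toList).map PySem.Chars.upper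
  match tokens with
  | [] => false
  | t0 :: _ =>
    if !(PySem.Chars.startswith t0 "SELECT".toList) then false
    else tokens.all (fun t => !(PySem.Set.contains pvDangerousSet t))

-- ===== PRECONDITION & SPEC =====
def Spec_is_safe_select_sql (sql : String) (out : Bool) : Prop := out = is_safe_select_sql_alt sql
instance (sql : String) (out : Bool) : Decidable (Spec_is_safe_select_sql sql out) := by unfold Spec_is_safe_select_sql; infer_instance

-- ===== CLAIM (what is proved, stated in full; the proofs are below) =====
def Claim_equal_is_safe_select_sql : Prop := ∀ (sql : String), Dom_is_safe_select_sql sql → Spec_is_safe_select_sql sql (is_safe_select_sql sql)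

-- ===== LEMMAS AND PROOFS =====
theorem pv_go_acc (s : List Char) : ∀ (cur : List Char) (acc : List (List Char)),
    PySem.Chars.split₀.go s cur acc = acc.reverse ++ PySem.Chars.split₀.go s cur [] := by
  induction s with
  | nil =>
    intro cur acc
    simp only [PySem.Chars.split₀.go]
    cases cur <;> simp
  | cons c rest ih =>
    intro cur acc
    simp only [PySem.Chars.split₀.go]
    by_cases hs : PySem.Chars.isspace c
    · by_cases hc : cur.isEmpty
      · simp only [hs, hc, if_true]
        exact ih [] acc
      · simp only [hs, hc, if_true, if_false, Bool.false_eq_true, ite_false]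
        rw [ih [] (cur.reverse :: acc), ih [] [cur.reverse]]
        simp
    · simp only [hs, Bool.false_eq_true, ite_false]
      exact ih (c :: cur) acc

def pvQ (c : Char) : Bool := !(PySem.Chars.isspace c)

theorem pv_go_spec (s : List Char) : ∀ (cur : List Char),
    PySem.Chars.split₀.go s cur [] =
      (if cur = [] ∧ s.takeWhile pvQ = [] then [] else [cur.reverse ++ s.takeWhile pvQ]) ++
        PySem.Chars.split₀.go (s.dropWhile pvQ) [] [] := by
  induction s with
  | nil =>
    intro cur
    simp only [List.takeWhile_nil, List.dropWhile_nil, and_true]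
    simp only [PySem.Chars.split₀.go]
    cases cur <;> simp
  | cons c rest ih =>
    intro cur
    by_cases hs : PySem.Chars.isspace c
    · have hq : pvQ c = false := by simp [pvQ, hs]
      simp only [List.takeWhile_cons, List.dropWhile_cons, hq, Bool.false_eq_true, if_false,
        and_true]
      conv_lhs => simp only [PySem.Chars.split₀.go, hs, if_true]
      by_cases hc : cur = []
      · subst hc
        simp only [List.isEmpty_nil, if_true, List.reverse_nil, List.nil_append]
        conv_rhs => simp only [PySem.Chars.split₀.go, hs, if_true, List.isEmpty_nil]
      · have : cur.isEmpty = false := by simpa [List.isEmpty_iff] using hc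
        simp only [this, Bool.false_eq_true, if_false, hc]
        rw [pv_go_acc]
        conv_rhs => simp only [PySem.Chars.split₀.go, hs, if_true, List.isEmpty_nil]
        simp
    · have hq : pvQ c = true := by simp [pvQ, hs]
      simp only [List.takeWhile_cons, List.dropWhile_cons, hq, if_true]
      conv_lhs => simp only [PySem.Chars.split₀.go, hs, Bool.false_eq_true, ite_false]
      rw [ih (c :: cur)]
      simp

theorem pv_go_lstrip (s : List Char) :
    PySem.Chars.split₀.go s [] [] = PySem.Chars.split₀.go (PySem.Chars.lstrip s) [] [] := by
  induction s with
  | nil => rfl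
  | cons c rest ih =>
    by_cases hs : PySem.Chars.isspace c
    · have : PySem.Chars.lstrip (c :: rest) = PySem.Chars.lstrip rest := by
        simp [PySem.Chars.lstrip, List.dropWhile_cons, hs]
      rw [this, ← ih]
      simp only [PySem.Chars.split₀.go, hs, if_true, List.isEmpty_nil]
    · have : PySem.Chars.lstrip (c :: rest) = c :: rest := by
        simp [PySem.Chars.lstrip, List.dropWhile_cons, hs]
      rw [this]

theorem pv_lstrip_head (s : List Char) (h : PySem.Chars.lstrip s ≠ []) :
    ∃ c r, PySem.Chars.lstrip s = c :: r ∧ ¬ PySem.Chars.isspace c := by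
  obtain ⟨c, r, hcr⟩ := List.exists_cons_of_ne_nil h
  refine ⟨c, r, hcr, ?_⟩
  have := List.head?_dropWhile_not (p := PySem.Chars.isspace) (l := s)
  simp only [PySem.Chars.lstrip] at hcr
  rw [hcr] at this
  simpa using this

theorem pv_split₀_unfold (s : List Char) :
    PySem.Chars.split₀ s =
      if PySem.Chars.lstrip s = [] then []
      else ((PySem.Chars.lstrip s).takeWhile pvQ) ::
        PySem.Chars.split₀ ((PySem.Chars.lstrip s).dropWhile pvQ) := by
  show PySem.Chars.split₀.go s [] [] = _
  rw [pv_go_lstrip, pv_go_spec]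
  by_cases h : PySem.Chars.lstrip s = []
  · simp [h]
    rfl
  · obtain ⟨c, r, hcr, hc⟩ := pv_lstrip_head s h
    have hq : pvQ c = true := by simp [pvQ, hc]
    simp [h, hcr, List.takeWhile_cons, hq]
    rfl

theorem pv_go_all_space (t : List Char) : ∀ (cur : List Char) (acc : List (List Char)),
    (∀ c ∈ t, PySem.Chars.isspace c) →
    PySem.Chars.split₀.go t cur acc = PySem.Chars.split₀.go [] cur acc := by
  induction t with
  | nil => intro cur acc _; rfl
  | cons c rest ih =>
    intro cur acc h
    have hs : PySem.Chars.isspace c := h c (by simp)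
    have hrest : ∀ d ∈ rest, PySem.Chars.isspace d := fun d hd => h d (by simp [hd])
    conv_lhs => simp only [PySem.Chars.split₀.go, hs, if_true]
    by_cases hc : cur.isEmpty
    · have hc' : cur = [] := by simpa [List.isEmpty_iff] using hc
      subst hc'
      simp only [List.isEmpty_nil, if_true]
      rw [ih [] acc hrest]
    · simp only [hc, Bool.false_eq_true, if_false]
      rw [ih [] (cur.reverse :: acc) hrest]
      simp only [PySem.Chars.split₀.go, List.isEmpty_nil, if_true, hc, Bool.false_eq_true,
        if_false]

theorem pv_go_append_space (u : List Char) : ∀ (t : List Char),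
    (∀ c ∈ t, PySem.Chars.isspace c) → ∀ (cur : List Char) (acc : List (List Char)),
    PySem.Chars.split₀.go (u ++ t) cur acc = PySem.Chars.split₀.go u cur acc := by
  induction u with
  | nil =>
    intro t ht cur acc
    simpa using pv_go_all_space t cur acc ht
  | cons c rest ih =>
    intro t ht cur acc
    by_cases hs : PySem.Chars.isspace c
    · by_cases hc : cur.isEmpty <;>
        simp only [List.cons_append, PySem.Chars.split₀.go, hs, hc, if_true, Bool.false_eq_true,
          if_false] <;> rw [ih t ht]
    · simp only [List.cons_append, PySem.Chars.split₀.go, hs, Bool.false_eq_true, if_false]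
      rw [ih t ht]

theorem pv_rstrip_decomp (s : List Char) :
    ∃ t, (∀ c ∈ t, PySem.Chars.isspace c) ∧ s = PySem.Chars.rstrip s ++ t := by
  refine ⟨(s.reverse.takeWhile PySem.Chars.isspace).reverse, ?_, ?_⟩
  · intro c hc
    exact List.mem_takeWhile_imp (by simpa using hc)
  · simp only [PySem.Chars.rstrip]
    rw [← List.reverse_append]
    simp [List.takeWhile_append_dropWhile]

theorem pv_split₀_strip (s : List Char) :
    PySem.Chars.split₀ (PySem.Chars.strip s) = PySem.Chars.split₀ s := by
  obtain ⟨t, ht, hdec⟩ := pv_rstrip_decomp (PySem.Chars.lstrip s)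
  show PySem.Chars.split₀.go (PySem.Chars.strip s) [] [] = PySem.Chars.split₀.go s [] []
  rw [pv_go_lstrip s]
  conv_rhs => rw [hdec]
  rw [pv_go_append_space _ t ht]
  rfl

theorem pv_len_lt (s : List Char) (h : PySem.Chars.lstrip s ≠ []) :
    ((PySem.Chars.lstrip s).dropWhile pvQ).length < s.length := by
  obtain ⟨c, r, hcr, hc⟩ := pv_lstrip_head s h
  have h1 : (PySem.Chars.lstrip s).length ≤ s.length := List.length_dropWhile_le _ _
  have hq : pvQ c = true := by simp [pvQ, hc]
  rw [hcr] at h1 ⊢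
  simp only [List.dropWhile_cons, hq, if_true]
  have h2 : (r.dropWhile pvQ).length ≤ r.length := List.length_dropWhile_le _ _
  simp at h1
  omega

theorem pv_strip_eq_nil_iff (s : List Char) :
    PySem.Chars.strip s = [] ↔ PySem.Chars.split₀ s = [] := by
  constructor
  · intro h
    rw [← pv_split₀_strip, h]
    rfl
  · intro h
    by_contra hne
    rw [← pv_split₀_strip] at h
    have hl : PySem.Chars.lstrip s ≠ [] := by
      intro hl
      exact hne (by simp [PySem.Chars.strip, hl, PySem.Chars.rstrip])
    obtain ⟨c, r, hcr, hc⟩ := pv_lstrip_head s hl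
    -- strip s is a nonempty prefix of lstrip s, hence starts with c (non-space)
    obtain ⟨t, ht, hdec⟩ := pv_rstrip_decomp (PySem.Chars.lstrip s)
    have hstrip : PySem.Chars.strip s = PySem.Chars.rstrip (PySem.Chars.lstrip s) := rfl
    obtain ⟨d, w, hdw⟩ := List.exists_cons_of_ne_nil hne
    have hd : d = c := by
      rw [hstrip] at hdw
      rw [hdw, hcr] at hdec
      simpa using congrArg (List.head? ·) hdec.symm
    have hls : PySem.Chars.lstrip (PySem.Chars.strip s) = PySem.Chars.strip s := by
      rw [hdw, hd]
      simp [PySem.Chars.lstrip, List.dropWhile_cons, hc]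
    rw [pv_split₀_unfold, hls, if_neg (by rw [hdw]; simp)] at h
    exact absurd h (by simp)

theorem pv_tokens_spacefree (s : List Char) :
    ∀ w ∈ PySem.Chars.split₀ s, w ≠ [] ∧ ∀ c ∈ w, ¬ PySem.Chars.isspace c := by
  generalize hn : s.length = n
  induction n using Nat.strong_induction_on generalizing s with
  | _ n ih =>
    subst hn
    rw [pv_split₀_unfold]
    by_cases h : PySem.Chars.lstrip s = []
    · simp [h]
    · obtain ⟨c, r, hcr, hc⟩ := pv_lstrip_head s h
      simp only [h, if_false]
      intro w hw
      rcases List.mem_cons.mp hw with hw | hw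
      · subst hw
        constructor
        · rw [hcr]
          simp [List.takeWhile_cons, pvQ, hc]
        · intro d hd
          have := List.mem_takeWhile_imp hd
          simpa [pvQ] using this
      · exact ih _ (pv_len_lt s h) _ rfl w hw

theorem pv_isspace_upperChar (c : Char) :
    PySem.Chars.isspace (PySem.Chars.upperChar c) = PySem.Chars.isspace c := by
  simp only [PySem.Chars.upperChar]
  by_cases h : PySem.Chars.islower c
  · have hv : ('a' ≤ c ∧ c ≤ 'z') := by simpa [PySem.Chars.islower] using h
    have hn : 97 ≤ c.toNat ∧ c.toNat ≤ 122 := by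
      exact ⟨hv.1, hv.2⟩
    have hvc : (c.toNat - 32).isValidChar := Or.inl (by omega)
    have hval : (Char.ofNat (c.toNat - 32)).toNat = c.toNat - 32 := by
      rw [Char.toNat_ofNat, if_pos hvc]
    have h9 : PySem.Chars.isspace c = false := by
      simp only [PySem.Chars.isspace]
      simp only [Bool.or_eq_false_iff, Bool.and_eq_false_iff, decide_eq_false_iff_not]
      omega
    have h10 : PySem.Chars.isspace (Char.ofNat (c.toNat - 32)) = false := by
      simp only [PySem.Chars.isspace, hval]
      simp only [Bool.or_eq_false_iff, Bool.and_eq_false_iff, decide_eq_false_iff_not]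
      omega
    simp only [h, if_true, h9, h10]
  · simp [h]

theorem pv_upper_join (ws : List (List Char)) :
    PySem.Chars.upper (PySem.Chars.join [' '] ws) =
      PySem.Chars.join [' '] (ws.map PySem.Chars.upper) := by
  induction ws with
  | nil => rfl
  | cons w rest ih =>
    cases rest with
    | nil => simp [PySem.Chars.join_singleton]
    | cons v vs =>
      rw [PySem.Chars.join_cons_cons]
      simp only [List.map_cons]
      rw [PySem.Chars.join_cons_cons]
      simp only [PySem.Chars.upper, List.map_append] at ih ⊢
      rw [ih]
      congr 1

def pvF (ws : List (List Char)) : List Char := ws.flatMap (fun w => ' ' :: w) ++ [' ']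

theorem pvF_cons (w : List Char) (ws : List (List Char)) :
    pvF (w :: ws) = ' ' :: (w ++ pvF ws) := by
  simp [pvF]

theorem pvF_head (ws : List (List Char)) : ∃ t, pvF ws = ' ' :: t := by
  cases ws with
  | nil => exact ⟨[], rfl⟩
  | cons w ws => exact ⟨w ++ pvF ws, pvF_cons w ws⟩

theorem pv_padded_eq (ws : List (List Char)) (h : ws ≠ []) :
    [' '] ++ PySem.Chars.join [' '] ws ++ [' '] = pvF ws := by
  induction ws with
  | nil => exact absurd rfl h
  | cons w rest ih =>
    cases rest with
    | nil => simp [PySem.Chars.join_singleton, pvF]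
    | cons v vs =>
      rw [PySem.Chars.join_cons_cons, pvF_cons, ← ih (by simp)]
      simp

theorem pv_prefix_spacefree (P : List Char) (hP : ∀ c ∈ P, ¬ PySem.Chars.isspace c) :
    ∀ (w r : List Char), P <+: w ++ ' ' :: r → P <+: w := by
  induction P with
  | nil => intro w r _; exact List.nil_prefix
  | cons a P' ih =>
    intro w r h
    cases w with
    | nil =>
      simp only [List.nil_append, List.cons_prefix_cons] at h
      exact absurd (h.1 ▸ hP a (by simp)) (by simp [PySem.Chars.isspace])
    | cons b w' =>
      simp only [List.cons_append, List.cons_prefix_cons] at h ⊢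
      exact ⟨h.1, ih (fun c hc => hP c (by simp [hc])) w' r h.2⟩

theorem pv_prefix_eq (k : List Char) (hk : ∀ c ∈ k, ¬ PySem.Chars.isspace c) :
    ∀ (w rest : List Char), (∀ c ∈ w, ¬ PySem.Chars.isspace c) →
      k ++ [' '] <+: w ++ ' ' :: rest → k = w := by
  induction k with
  | nil =>
    intro w rest hw h
    cases w with
    | nil => rfl
    | cons d w' =>
      simp only [List.nil_append, List.cons_append, List.cons_prefix_cons] at h
      exact absurd (h.1 ▸ hw d (by simp)) (by simp [PySem.Chars.isspace])
  | cons a k' ih =>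
    intro w rest hw h
    cases w with
    | nil =>
      simp only [List.cons_append, List.nil_append, List.cons_prefix_cons] at h
      exact absurd (h.1 ▸ hk a (by simp)) (by simp [PySem.Chars.isspace])
    | cons d w' =>
      simp only [List.cons_append, List.cons_prefix_cons] at h
      rw [h.1, ih (fun c hc => hk c (by simp [hc])) w' rest (fun c hc => hw c (by simp [hc])) h.2]

theorem pv_skip_word (u : List Char) :
    ∀ (w b : List Char), (∀ c ∈ w, ¬ PySem.Chars.isspace c) →
      (∃ j, ' ' :: u <+: (w ++ b).drop j) → ∃ j, ' ' :: u <+: b.drop j := by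
  intro w
  induction w with
  | nil => intro b _ h; simpa using h
  | cons d w' ih =>
    intro b hw h
    obtain ⟨j, hj⟩ := h
    cases j with
    | zero =>
      simp only [List.drop_zero, List.cons_append, List.cons_prefix_cons] at hj
      exact absurd (hj.1.symm ▸ hw d (by simp)) (by simp [PySem.Chars.isspace])
    | succ j' =>
      exact ih b (fun c hc => hw c (by simp [hc])) ⟨j', by simpa using hj⟩

theorem pv_mem_iff_infix (k : List Char) (hk : k ≠ []) (hksp : ∀ c ∈ k, ¬ PySem.Chars.isspace c)
    (ws : List (List Char)) (hws : ∀ w ∈ ws, ∀ c ∈ w, ¬ PySem.Chars.isspace c) :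
    PySem.Chars.isIn (' ' :: (k ++ [' '])) (pvF ws) = true ↔ k ∈ ws := by
  rw [← PySem.Chars.exists_prefix_drop_iff_isIn]
  constructor
  · intro h
    induction ws with
    | nil =>
      obtain ⟨j, hj⟩ := h
      have h1 := hj.length_le
      have h2 : (pvF []).length = 1 := by simp [pvF]
      rw [List.length_drop] at h1
      simp only [List.length_cons, List.length_append] at h1
      omega
    | cons w ws' ih =>
      obtain ⟨j, hj⟩ := h
      rw [pvF_cons] at hj
      cases j with
      | zero =>
        simp only [List.drop_zero, List.cons_prefix_cons] at hj
        obtain ⟨t, ht⟩ := pvF_head ws'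
        rw [ht] at hj
        have := pv_prefix_eq k hksp w t (hws w (by simp)) (by simpa using hj.2)
        simp [this]
      | succ j' =>
        have hj' : ∃ j, ' ' :: (k ++ [' ']) <+: (w ++ pvF ws').drop j := ⟨j', by simpa using hj⟩
        have := pv_skip_word (k ++ [' ']) w (pvF ws') (hws w (by simp)) hj'
        have hmem := ih (fun v hv => hws v (by simp [hv])) this
        simp [hmem]
  · intro hmem
    induction ws with
    | nil => simp at hmem
    | cons w ws' ih =>
      rcases List.mem_cons.mp hmem with hkw | hkw
      · subst hkw
        refine ⟨0, ?_⟩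
        rw [pvF_cons]
        obtain ⟨t, ht⟩ := pvF_head ws'
        rw [ht]
        simp only [List.drop_zero, List.cons_prefix_cons, true_and]
        simp only [List.prefix_append_right_inj]
        exact ⟨t, rfl⟩
      · obtain ⟨j, hj⟩ := ih (fun v hv => hws v (by simp [hv])) hkw
        refine ⟨w.length + j + 1, ?_⟩
        rw [pvF_cons]
        have : (' ' :: (w ++ pvF ws')).drop (w.length + j + 1) = (pvF ws').drop j := by
          simp only [List.drop_succ_cons]
          exact List.drop_length_add_append j
        rw [this]
        exact hj

theorem pv_B_eq_A : pvDangerousB = pvDangerousA := rfl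

theorem pv_select_spacefree : ∀ c ∈ "SELECT".toList, ¬ PySem.Chars.isspace c := by
  have h : "SELECT".toList = ['S','E','L','E','C','T'] := rfl
  rw [h]
  intro c hc
  fin_cases hc <;> decide

theorem pv_kw_facts : ∀ kw ∈ pvDangerousA, kw ≠ [] ∧ ∀ c ∈ kw, ¬ PySem.Chars.isspace c := by
  have h : pvDangerousA = [['I','N','S','E','R','T'], ['U','P','D','A','T','E'],
      ['D','E','L','E','T','E'], ['D','R','O','P'], ['A','L','T','E','R'],
      ['C','R','E','A','T','E'], ['R','E','P','L','A','C','E'],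
      ['T','R','U','N','C','A','T','E'], ['A','T','T','A','C','H'],
      ['C','O','P','Y'], ['P','R','A','G','M','A']] := rfl
  rw [h]
  intro kw hkw
  fin_cases hkw <;>
    exact ⟨by simp, by intro c hc; fin_cases hc <;> decide⟩

theorem is_safe_select_sql_spec' (sql : String) :
    is_safe_select_sql sql = is_safe_select_sql_alt sql := by
  by_cases hstrip : PySem.Chars.strip sql.toList = []
  · have hsp : PySem.Chars.split₀ sql.toList = [] := (pv_strip_eq_nil_iff _).mp hstrip
    simp [is_safe_select_sql, is_safe_select_sql_alt, hstrip, hsp]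
  · have hsp : PySem.Chars.split₀ sql.toList ≠ [] :=
      fun h => hstrip ((pv_strip_eq_nil_iff _).mpr h)
    obtain ⟨t, ts', hts⟩ := List.exists_cons_of_ne_nil hsp
    have hnorm : PySem.Chars.upper
        (PySem.Chars.join [' '] (PySem.Chars.split₀ (PySem.Chars.strip sql.toList))) =
        PySem.Chars.join [' '] ((t :: ts').map PySem.Chars.upper) := by
      rw [pv_split₀_strip, hts, pv_upper_join]
    -- the uppercased token list
    set uts : List (List Char) := (t :: ts').map PySem.Chars.upper with huts
    have hutssp : ∀ w ∈ uts, ∀ c ∈ w, ¬ PySem.Chars.isspace c := by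
      intro w hw c hc
      rw [huts] at hw
      obtain ⟨w0, hw0, rfl⟩ := List.mem_map.mp hw
      obtain ⟨d, hd, rfl⟩ := List.mem_map.mp hc
      have := (pv_tokens_spacefree sql.toList w0 (by rw [hts]; exact hw0)).2 d hd
      rw [pv_isspace_upperChar]
      exact this
    have hsw : PySem.Chars.startswith (PySem.Chars.join [' '] uts) "SELECT".toList =
        PySem.Chars.startswith (PySem.Chars.upper t) "SELECT".toList := by
      rw [huts]
      cases ts' with
      | nil => rw [List.map_cons, List.map_nil, PySem.Chars.join_singleton]
      | cons v vs =>
        simp only [List.map_cons]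
        rw [PySem.Chars.join_cons_cons]
        rw [Bool.eq_iff_iff, PySem.Chars.startswith_iff, PySem.Chars.startswith_iff]
        constructor
        · intro h
          exact pv_prefix_spacefree _ pv_select_spacefree _ _ (by simpa using h)
        · intro h
          refine h.trans ?_
          rw [List.append_assoc]
          exact List.prefix_append _ _
    simp only [is_safe_select_sql, is_safe_select_sql_alt, hstrip, if_false, hnorm, hts,
      List.map_cons]
    rw [← List.map_cons, ← huts]
    rw [hsw]
    congr 1
    -- A's keyword loop vs B's token loop
    have hpad : ' ' :: (PySem.Chars.join [' '] uts ++ [' ']) = pvF uts := by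
      have := pv_padded_eq uts (by rw [huts]; simp)
      simpa using this
    have hin : ∀ kw ∈ pvDangerousA,
        (PySem.Chars.isIn (' ' :: (kw ++ [' '])) (' ' :: (PySem.Chars.join [' '] uts ++ [' '])) = true ↔
          kw ∈ uts) := by
      intro kw hkw
      have hf := pv_kw_facts kw hkw
      rw [hpad]
      exact pv_mem_iff_infix kw hf.1 hf.2 uts hutssp
    by_cases hA : (pvDangerousA.any fun kw =>
        PySem.Chars.isIn ([' '] ++ kw ++ [' ']) ([' '] ++ PySem.Chars.join [' '] uts ++ [' '])) = true
    · rw [if_pos hA]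
      obtain ⟨kw, hkw, hx⟩ := List.any_eq_true.mp hA
      have hmem : kw ∈ uts := (hin kw hkw).mp hx
      symm
      rw [List.all_eq_false]
      refine ⟨kw, hmem, ?_⟩
      have hkB : kw ∈ pvDangerousSet := by
        rw [pvDangerousSet]
        exact (PySem.Set.mem_ofList _ _).mpr (pv_B_eq_A.symm ▸ hkw)
      simp [PySem.Set.contains, List.contains_eq_mem, hkB]
    · rw [if_neg hA]
      symm
      rw [List.all_eq_true]
      intro tok htok
      have hnd : tok ∉ pvDangerousA :=
        fun hd => hA (List.any_eq_true.mpr ⟨tok, hd, (hin tok hd).mpr htok⟩)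
      have hkB : tok ∉ pvDangerousSet := by
        rw [pvDangerousSet]
        exact fun hm => hnd (pv_B_eq_A ▸ (PySem.Set.mem_ofList _ _).mp hm)
      simp [PySem.Set.contains, List.contains_eq_mem, hkB]

-- ===== VERDICT (by name: the statement is the Claim_ definition above) =====
theorem is_safe_select_sql_spec : Claim_equal_is_safe_select_sql := by
  intro sql _
  exact is_safe_select_sql_spec' sql
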